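-- pv_equiv track=rewrite | github.com/pavanpajjuri/leetcode-codes | neetcode-150/1482-minimum-number-of-days-to-make-m-bouquets.py | is_feasible
-- ===== SOURCE A (Python) =====
-- def is_feasible(bloomDay, mid, m, k):
--     bq = fl = 0
--     for x in bloomDay:
--         if x <= mid:
--             fl += 1
--             if fl == k:
--                 bq += 1
--                 fl = 0
--         else:
--             fl = 0
--     return bq >= m
-- ===== SOURCE B (Python) =====
-- def is_feasible(bloomDay, mid, m, k):
--     # Segment bloomDay into maximal consecutive runs of bloomed flowers (x <= mid),
--     # then each run of length L yields L // k bouquets.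
--     runs = []
--     cur = 0
--     for x in bloomDay:
--         if x <= mid:
--             cur += 1
--         else:
--             if cur != 0:
--                 runs.append(cur)
--             cur = 0
--     if cur != 0:
--         runs.append(cur)
--     return sum(L // k for L in runs) >= m
-- ===== Notes on version B (the rewrite author's own statement) =====
-- stated objective: alternative
-- what changed: B replaces A's incremental count-to-k-then-reset counter with a run-length decomposition: it collects the lengths of maximal consecutive bloomed runs and sums floor(L/k) over them.
-- outside the precondition, e.g. on is_feasible([1, 2], 1, 0, 0): A returns True, B raises ZeroDivisionError; on is_feasible([1], 1, 0, -1): A returns True, B returns False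
import Mathlib
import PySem

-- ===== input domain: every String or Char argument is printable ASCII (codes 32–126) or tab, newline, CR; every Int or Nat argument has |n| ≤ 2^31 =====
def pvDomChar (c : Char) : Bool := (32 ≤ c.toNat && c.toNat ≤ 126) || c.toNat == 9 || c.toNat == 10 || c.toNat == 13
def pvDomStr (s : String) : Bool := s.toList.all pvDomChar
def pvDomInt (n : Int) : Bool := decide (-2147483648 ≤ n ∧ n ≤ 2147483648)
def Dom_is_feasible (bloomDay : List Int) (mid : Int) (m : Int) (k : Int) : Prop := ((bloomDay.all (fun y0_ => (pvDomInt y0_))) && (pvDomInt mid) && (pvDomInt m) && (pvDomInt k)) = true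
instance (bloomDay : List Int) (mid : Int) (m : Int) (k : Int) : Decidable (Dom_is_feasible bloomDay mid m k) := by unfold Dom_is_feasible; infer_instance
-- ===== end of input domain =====

-- B replaces A's count-to-k-then-reset counter with a run-length decomposition
-- (collect maximal bloomed run lengths, sum floor(L/k)); same O(n) cost.

-- ===== PORT A =====
def aStep (mid k : Int) (st : Int × Int) (x : Int) : Int × Int :=
  if x ≤ mid then
    let fl := st.2 + 1
    if fl = k then (st.1 + 1, 0) else (st.1, fl)
  else (st.1, 0)

def is_feasible (bloomDay : List Int) (mid : Int) (m : Int) (k : Int) : Bool :=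
  let s := bloomDay.foldl (aStep mid k) (0, 0)
  decide (s.1 ≥ m)

-- ===== PORT B =====
def bStep (mid : Int) (st : List Int × Int) (x : Int) : List Int × Int :=
  if x ≤ mid then (st.1, st.2 + 1)
  else (if st.2 ≠ 0 then st.1 ++ [st.2] else st.1, 0)

def is_feasible_alt (bloomDay : List Int) (mid : Int) (m : Int) (k : Int) : Bool :=
  let s := bloomDay.foldl (bStep mid) ([], 0)
  let runs := if s.2 ≠ 0 then s.1 ++ [s.2] else s.1
  decide ((runs.map (fun L => PySem.Int.floordiv L k)).sum ≥ m)

-- ===== PRECONDITION & SPEC =====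
-- Pre_ restricts to the problem's natural domain k ≥ 1 (flowers per bouquet): for k = 0
-- B's floor division raises ZeroDivisionError, and for k < 0 a bouquet size is meaningless
-- (A's 'fl == k' then accidentally never fires).
def Pre_is_feasible (bloomDay : List Int) (mid : Int) (m : Int) (k : Int) : Prop := 1 ≤ k
instance (bloomDay : List Int) (mid : Int) (m : Int) (k : Int) : Decidable (Pre_is_feasible bloomDay mid m k) := by unfold Pre_is_feasible; infer_instance
def pvWitness_is_feasible : List Int × Int × Int × Int := ([1, 10, 3, 10, 2], 3, 1, 2)

def Spec_is_feasible (bloomDay : List Int) (mid : Int) (m : Int) (k : Int) (out : Bool) : Prop := out = is_feasible_alt bloomDay mid m k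
instance (bloomDay : List Int) (mid : Int) (m : Int) (k : Int) (out : Bool) : Decidable (Spec_is_feasible bloomDay mid m k out) := by unfold Spec_is_feasible; infer_instance

-- ===== CLAIM (what is proved, stated in full; the proofs are below) =====
def Claim_equal_is_feasible : Prop := ∀ (bloomDay : List Int) (mid : Int) (m : Int) (k : Int), Dom_is_feasible bloomDay mid m k → Pre_is_feasible bloomDay mid m k → Spec_is_feasible bloomDay mid m k (is_feasible bloomDay mid m k)

-- ===== LEMMAS AND PROOFS =====

-- Stepping a bloomed flower: floor-division counters advance exactly like A's counter.
theorem emod_succ (cur k : Int) (hk : 1 ≤ k) :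
    (cur + 1) % k = if cur % k + 1 = k then 0 else cur % k + 1 := by
  have h := Int.emod_add_ediv cur k
  have h2 : 0 ≤ cur % k := Int.emod_nonneg cur (by omega)
  have h3 : cur % k < k := Int.emod_lt_of_pos cur (by omega)
  by_cases hc : cur % k + 1 = k
  · have h1 : cur + 1 = k * (cur / k + 1) := by linarith
    rw [h1, Int.mul_emod_right, if_pos hc]
  · have h1 : cur + 1 = (cur % k + 1) + k * (cur / k) := by linarith
    rw [h1, Int.add_mul_emod_self_left, Int.emod_eq_of_lt (by omega) (by omega), if_neg hc]

theorem ediv_succ (cur k : Int) (hk : 1 ≤ k) :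
    (cur + 1) / k = cur / k + (if cur % k + 1 = k then 1 else 0) := by
  have h := Int.emod_add_ediv cur k
  have h2 : 0 ≤ cur % k := Int.emod_nonneg cur (by omega)
  have h3 : cur % k < k := Int.emod_lt_of_pos cur (by omega)
  by_cases hc : cur % k + 1 = k
  · have h1 : cur + 1 = k * (cur / k + 1) := by linarith
    rw [h1, Int.mul_ediv_cancel_left _ (show k ≠ 0 by omega), if_pos hc]
  · have h1 : cur + 1 = (cur % k + 1) + (cur / k) * k := by linarith
    rw [h1, Int.add_mul_ediv_right _ _ (show k ≠ 0 by omega),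
        Int.ediv_eq_zero_of_lt (by omega) (by omega), if_neg hc]
    omega

-- The loop invariant: A's (bq, fl) versus B's (runs, cur) state, for any remaining list.
theorem inv_lemma (mid k : Int) (hk : 1 ≤ k) (L : List Int)
    (bq fl : Int) (runs : List Int) (cur : Int)
    (hcur : 0 ≤ cur) (hfl : fl = cur % k)
    (hbq : bq = (runs.map (fun r => PySem.Int.floordiv r k)).sum + cur / k) :
    (L.foldl (aStep mid k) (bq, fl)).1 =
      ((let s := L.foldl (bStep mid) (runs, cur);
        if s.2 ≠ 0 then s.1 ++ [s.2] else s.1).map (fun r => PySem.Int.floordiv r k)).sum := by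
  induction L generalizing bq fl runs cur with
  | nil =>
    simp only [List.foldl_nil]
    by_cases hc : cur = 0
    · simp only [hc, ne_eq, not_true_eq_false, if_false, ite_false]
      simpa [hc] using hbq
    · simp only [hc, ne_eq, not_false_eq_true, if_true, ite_true, List.map_append,
        List.map_cons, List.map_nil, List.sum_append, List.sum_cons, List.sum_nil]
      rw [PySem.Int.floordiv_eq_ediv_of_pos (show (0:Int) < k by omega)]
      omega
  | cons x t ih =>
    simp only [List.foldl_cons]
    by_cases hx : x ≤ mid
    · simp only [aStep, bStep, hx, if_pos]
      by_cases hfull : fl + 1 = k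
      · simp only [hfull, if_pos]
        exact ih (bq + 1) 0 runs (cur + 1) (by omega)
          (by rw [emod_succ cur k hk, if_pos (by omega)])
          (by rw [ediv_succ cur k hk, if_pos (by omega)]; omega)
      · simp only [hfull, if_false, ite_false]
        exact ih bq (fl + 1) runs (cur + 1) (by omega)
          (by rw [emod_succ cur k hk, if_neg (by omega)]; omega)
          (by rw [ediv_succ cur k hk, if_neg (by omega)]; omega)
    · simp only [aStep, bStep, hx, if_false, ite_false]
      by_cases hc : cur = 0
      · simp only [hc, ne_eq, not_true_eq_false, if_false, ite_false]
        refine ih bq 0 runs 0 le_rfl (by simp) ?_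
        simpa [hc] using hbq
      · simp only [hc, ne_eq, not_false_eq_true, if_true, ite_true]
        refine ih bq 0 (runs ++ [cur]) 0 le_rfl (by simp) ?_
        simp only [List.map_append, List.map_cons, List.map_nil, List.sum_append,
          List.sum_cons, List.sum_nil, Int.zero_ediv]
        rw [PySem.Int.floordiv_eq_ediv_of_pos (show (0:Int) < k by omega)]
        omega

-- ===== VERDICT (by name: the statement is the Claim_ definition above) =====
theorem is_feasible_spec : Claim_equal_is_feasible := by
  intro bloomDay mid m k _ hk
  unfold Spec_is_feasible is_feasible is_feasible_alt
  have h := inv_lemma mid k hk bloomDay 0 0 [] 0 le_rfl (by simp) (by simp)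
  simp only at h ⊢
  rw [h]
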